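-- pv_equiv track=rewrite | github.com/ShmctChina/FinGLM | code/南哪都队/chatglm_full_code_final/glm_components/query/document_retrieval/new_format_document_BM25.py | crop_context
-- ===== SOURCE A (Python) =====
-- def crop_context(relevant_doc_list, max_length):
--     total_length = sum(len(doc) for doc in relevant_doc_list)
--     if total_length > max_length:
--         remaining_doc_list = []
--         total_length = max_length
--         for doc in relevant_doc_list:
--             if len(doc) < total_length:
--                 total_length -= len(doc)
--                 remaining_doc_list.append(doc)
--             else:
--                 remaining_doc_list.append(doc[:total_length])
--                 break
--     else:
--         remaining_doc_list = relevant_doc_list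
--     return remaining_doc_list
-- ===== SOURCE B (Python) =====
-- def crop_context(relevant_doc_list, max_length):
--     if not relevant_doc_list:
--         return []
--     # staged approach: build the prefix-sum table of document lengths once,
--     # locate the crop point by counting prefix sums below the budget,
--     # then assemble the result by slicing -- no truncate-as-you-go loop.
--     prefix = [0]
--     for doc in relevant_doc_list:
--         prefix.append(prefix[-1] + len(doc))
--     if prefix[-1] <= max_length:
--         return relevant_doc_list
--     k = sum(1 for p in prefix[1:] if p < max_length)
--     return relevant_doc_list[:k] + [relevant_doc_list[k][:max_length - prefix[k]]]
-- ===== Notes on version B (the rewrite author's own statement) =====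
-- stated objective: alternative
-- what changed: B replaces A's decrementing-budget append/break loop by a staged prefix-sum algorithm: it tabulates cumulative document lengths, computes the crop index k as the count of prefix sums below max_length, and assembles the answer as a list slice plus one sliced document.
import Mathlib
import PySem

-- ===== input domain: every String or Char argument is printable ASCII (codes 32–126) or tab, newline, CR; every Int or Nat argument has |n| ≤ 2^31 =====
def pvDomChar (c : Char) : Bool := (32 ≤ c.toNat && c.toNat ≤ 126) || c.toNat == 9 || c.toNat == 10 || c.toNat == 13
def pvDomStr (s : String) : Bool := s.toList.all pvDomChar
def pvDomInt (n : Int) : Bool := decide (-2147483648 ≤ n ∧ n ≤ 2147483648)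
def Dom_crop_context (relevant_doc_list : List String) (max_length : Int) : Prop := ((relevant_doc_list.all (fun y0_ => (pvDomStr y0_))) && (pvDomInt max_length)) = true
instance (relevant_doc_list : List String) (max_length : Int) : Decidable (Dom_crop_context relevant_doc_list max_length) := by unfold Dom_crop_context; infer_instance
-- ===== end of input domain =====

-- B replaces A's decrementing-budget append/break loop by a staged prefix-sum algorithm:
-- tabulate cumulative document lengths, count the prefix sums below max_length to find the
-- crop index, and assemble the result by slicing (objective: alternative; return value only —
-- A returns the input list object itself in the no-crop case, B returns an equal fresh list).

-- ===== PORT A =====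
-- A's 'for doc in relevant_doc_list' crop loop; state = the shrinking budget; 'break' = stop recursing
def cropALoop : List String → Int → List String
  | [], _ => []
  | d :: ds, rem =>
    if PySem.Str.len d < rem then d :: cropALoop ds (rem - PySem.Str.len d)
    else [PySem.Str.slice d none (some rem)]

def crop_context (relevant_doc_list : List String) (max_length : Int) : List String :=
  let total_length := relevant_doc_list.foldl (fun acc d => acc + PySem.Str.len d) 0
  if total_length > max_length then cropALoop relevant_doc_list max_length
  else relevant_doc_list

-- ===== PORT B =====
-- B's prefix-building loop 'for doc: prefix.append(prefix[-1] + len(doc))': the running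
-- prefix[-1] is the carried accumulator; the returned list is prefix[1:]
def pvPfx : List String → Int → List Int
  | [], _ => []
  | d :: ds, last => (last + PySem.Str.len d) :: pvPfx ds (last + PySem.Str.len d)

-- the two pyGet?s never return none here (prefix is nonempty; k < len(l) in the crop branch,
-- proved below), so the .getD defaults are never used and the port is exact
def crop_context_alt (relevant_doc_list : List String) (max_length : Int) : List String :=
  if relevant_doc_list.isEmpty then []
  else
    let pfx : List Int := 0 :: pvPfx relevant_doc_list 0
    if (PySem.List.pyGet? pfx (-1)).getD 0 ≤ max_length then relevant_doc_list
    else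
      let k : Int := (((pfx.drop 1).filter (fun p => decide (p < max_length))).length : Int)
      PySem.List.slice relevant_doc_list none (some k) ++
        [PySem.Str.slice ((PySem.List.pyGet? relevant_doc_list k).getD "") none
          (some (max_length - (PySem.List.pyGet? pfx k).getD 0))]

-- ===== PRECONDITION & SPEC =====
def Spec_crop_context (relevant_doc_list : List String) (max_length : Int) (out : List String) : Prop := out = crop_context_alt relevant_doc_list max_length
instance (relevant_doc_list : List String) (max_length : Int) (out : List String) : Decidable (Spec_crop_context relevant_doc_list max_length out) := by unfold Spec_crop_context; infer_instance

-- ===== CLAIM (what is proved, stated in full; the proofs are below) =====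
def Claim_equal_crop_context : Prop := ∀ (relevant_doc_list : List String) (max_length : Int), Dom_crop_context relevant_doc_list max_length → Spec_crop_context relevant_doc_list max_length (crop_context relevant_doc_list max_length)

-- ===== LEMMAS AND PROOFS =====
-- total length of a list of documents
def slen (l : List String) : Int := (l.map PySem.Str.len).sum

-- B's crop index: the number of prefix sums strictly below the budget
def Kof (l : List String) (m : Int) : Nat :=
  ((pvPfx l 0).filter (fun p => decide (p < m))).length

theorem strLen_nonneg (d : String) : 0 ≤ PySem.Str.len d := by
  simp [PySem.Str.len_eq]

theorem slen_cons (d : String) (ds : List String) :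
    slen (d :: ds) = PySem.Str.len d + slen ds := by simp [slen]

theorem pvPfx_length (l : List String) : ∀ a, (pvPfx l a).length = l.length := by
  induction l with
  | nil => intro a; simp [pvPfx]
  | cons d ds ih => intro a; simp [pvPfx, ih]

theorem pvPfx_shift (l : List String) : ∀ a, pvPfx l a = (pvPfx l 0).map (fun x => a + x) := by
  induction l with
  | nil => intro a; simp [pvPfx]
  | cons d ds ih =>
    intro a
    simp only [pvPfx, List.map_cons, zero_add, List.cons.injEq, true_and]
    rw [ih (a + PySem.Str.len d), ih (PySem.Str.len d), List.map_map]
    congr 1; funext x; simp; ring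

theorem pvPfx_ge (l : List String) : ∀ a x, x ∈ pvPfx l a → a ≤ x := by
  induction l with
  | nil => intro a x h; simp [pvPfx] at h
  | cons d ds ih =>
    intro a x h
    have hd := strLen_nonneg d
    simp only [pvPfx, List.mem_cons] at h
    rcases h with h | h
    · omega
    · have := ih (a + PySem.Str.len d) x h; omega

-- the full prefix list (a :: pvPfx l a) at any in-range index k holds a + slen (take k l)
theorem pvPfx_get (l : List String) : ∀ (k : Nat) (a : Int), k ≤ l.length →
    (a :: pvPfx l a)[k]? = some (a + slen (l.take k)) := by
  induction l with
  | nil =>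
    intro k a hk
    have : k = 0 := by simpa using hk
    subst this
    simp [slen]
  | cons d ds ih =>
    intro k a hk
    cases k with
    | zero => simp [slen]
    | succ j =>
      simp only [pvPfx, List.getElem?_cons_succ]
      have := ih j (a + PySem.Str.len d) (by simpa using hk)
      rw [this]
      simp [List.take_succ_cons, slen_cons]
      ring

theorem Kof_cons (d : String) (ds : List String) (m : Int) :
    Kof (d :: ds) m = if PySem.Str.len d < m then Kof ds (m - PySem.Str.len d) + 1 else 0 := by
  by_cases hc : PySem.Str.len d < m
  · rw [if_pos hc]
    unfold Kof
    simp only [pvPfx, zero_add, List.filter_cons, decide_eq_true_eq, if_pos hc]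
    rw [pvPfx_shift ds (PySem.Str.len d), List.filter_map, List.length_cons, List.length_map]
    congr 2
    apply List.filter_congr
    intro x _
    simp only [Function.comp_apply, decide_eq_decide]
    omega
  · rw [if_neg hc]
    unfold Kof
    simp only [pvPfx, zero_add, List.filter_cons, decide_eq_true_eq, if_neg hc]
    rw [List.filter_eq_nil_iff.mpr, List.length_nil]
    intro x hx
    have := pvPfx_ge ds (PySem.Str.len d) x hx
    simp only [decide_eq_true_eq]
    omega

theorem Kof_le (l : List String) (m : Int) : Kof l m ≤ l.length := by
  unfold Kof
  calc ((pvPfx l 0).filter _).length ≤ (pvPfx l 0).length := List.length_filter_le _ _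
    _ = l.length := pvPfx_length l 0

-- main correspondence: on a nonempty list in the crop branch, A's budget loop produces
-- exactly B's slice-and-crop assembly at index Kof l m
theorem cropMain (l : List String) : ∀ m : Int, l ≠ [] → m < slen l →
    cropALoop l m =
      l.take (Kof l m) ++
        [PySem.Str.slice ((PySem.List.pyGet? l ((Kof l m : Nat) : Int)).getD "") none
          (some (m - slen (l.take (Kof l m))))] := by
  induction l with
  | nil => intro m h _; exact absurd rfl h
  | cons d ds ih =>
    intro m _ hm
    rw [slen_cons] at hm
    by_cases hc : PySem.Str.len d < m
    · -- doc kept whole; recurse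
      have hds : ds ≠ [] := by
        intro h; subst h
        have hld : PySem.Str.len d = (d.length : Int) := PySem.Str.len_eq d
        simp [slen] at hm; omega
      have hm' : m - PySem.Str.len d < slen ds := by omega
      rw [Kof_cons, if_pos hc]
      simp only [cropALoop, if_pos hc, List.take_succ_cons, slen_cons]
      rw [ih (m - PySem.Str.len d) hds hm']
      have hget : PySem.List.pyGet? (d :: ds) (((Kof ds (m - PySem.Str.len d) + 1 : Nat)) : Int)
          = PySem.List.pyGet? ds ((Kof ds (m - PySem.Str.len d) : Nat) : Int) := by
        simp [PySem.List.pyGet?_natCast]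
      rw [hget]
      have harith : m - (PySem.Str.len d + slen (List.take (Kof ds (m - PySem.Str.len d)) ds))
          = m - PySem.Str.len d - slen (List.take (Kof ds (m - PySem.Str.len d)) ds) := by ring
      rw [harith]
      simp
    · -- first doc already meets the budget: crop index 0
      rw [Kof_cons, if_neg hc]
      simp only [cropALoop, if_neg hc, List.take_zero, List.nil_append]
      simp [slen]

theorem foldl_len_eq_slen (l : List String) :
    l.foldl (fun acc d => acc + PySem.Str.len d) 0 = slen l := by
  rw [PySem.List.foldl_add]; simp [slen]

-- the last entry of the prefix list is the total length
theorem prefix_last (l : List String) :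
    (PySem.List.pyGet? (0 :: pvPfx l 0) (-1)).getD 0 = slen l := by
  rw [PySem.List.pyGet?_neg_one]
  have h1 : (0 :: pvPfx l 0).getLast? = (0 :: pvPfx l 0)[(0 :: pvPfx l 0).length - 1]? :=
    List.getLast?_eq_getElem?
  have h2 : (0 :: pvPfx l 0).length - 1 = l.length := by simp [pvPfx_length]
  rw [h1, h2, pvPfx_get l l.length 0 (le_refl _)]
  simp

-- ===== VERDICT (by name: the statement is the Claim_ definition above) =====
theorem crop_context_spec : Claim_equal_crop_context := by
  intro l m _
  unfold Spec_crop_context crop_context crop_context_alt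
  rw [foldl_len_eq_slen]
  cases l with
  | nil =>
    simp only [List.isEmpty_nil, if_true]
    by_cases h : slen [] > m
    · rw [if_pos h]; rfl
    · rw [if_neg h]
  | cons d ds =>
    simp only [List.isEmpty_cons, Bool.false_eq_true, if_false, List.drop_one, List.tail_cons]
    rw [prefix_last (d :: ds)]
    by_cases h : slen (d :: ds) > m
    · rw [if_pos h, if_neg (by omega)]
      rw [cropMain (d :: ds) m (by simp) (by omega)]
      have hk : ((pvPfx (d :: ds) 0).filter (fun p => decide (p < m))).length = Kof (d :: ds) m := rfl
      have hkle := Kof_le (d :: ds) m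
      rw [PySem.List.slice_to_natCast]
      have hg := pvPfx_get (d :: ds) (Kof (d :: ds) m) 0 hkle
      simp only [hk, PySem.List.pyGet?_natCast, hg, Option.getD_some, zero_add]
    · rw [if_neg h, if_pos (by omega)]
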